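-- pv_equiv track=rewrite | github.com/marescas/MIARFID | TIA/geneticv2.py | aptitudSinArreglo
-- ===== SOURCE A (Python) =====
-- def aptitudSinArreglo(individuo, numeros, valorBuscado):
--     """
--
--     Evalua un individuo:
--          No se arregla ningun individuo
--          Si el resultado de la división es decimal --> Peor valor
--          Si nos pasamos --> Peor valor
--     :param individuo: individuo codificado
--     0 --> suma
--     1 --> resta
--     2 --> multiplicacion
--     3 --> division
--     :param numeros: datos del problema
--     :param valorBuscado: valor que queremos aproximar sin pasarnos
--     """
--     res = numeros[0]
--     for operacion, numero in zip(individuo, numeros[1:]):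
--         if operacion == 0:
--             res += numero
--         if operacion == 1:
--             res -= numero
--         if operacion == 2:
--             res *= numero
--         if operacion == 3:
--             res /= numero
--             if type(res) == float:
--                 # El resultado de la division no puede ser decimal
--                 return 2**100
--     if res > valorBuscado:
--         # si me paso devuelvo un valor muy alto
--         return 2**100
--
--     if res < 0:
--         return 2**100
--     return valorBuscado-res
-- ===== SOURCE B (Python) =====
-- def aptitudSinArreglo(individuo, numeros, valorBuscado):
--     # Two-phase: any division makes the result a float, hence the worst value;
--     # otherwise fold the remaining integer operations and apply the guards.
--     pairs = list(zip(individuo, numeros[1:]))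
--     if any(op == 3 for op, _ in pairs):
--         return 2**100
--     res = numeros[0]
--     for op, n in pairs:
--         if op == 0:
--             res += n
--         elif op == 1:
--             res -= n
--         elif op == 2:
--             res *= n
--     if res > valorBuscado or res < 0:
--         return 2**100
--     return valorBuscado - res
-- ===== Notes on version B (the rewrite author's own statement) =====
-- stated objective: simpler
-- what changed: Replaces A's single branch-laden early-return loop (with its float-type check after each division) by a two-phase computation: first detect whether any effective operation is a division (which always yields the worst value 2**100), then fold only add/sub/mul over the pairs and apply the final guards.
import Mathlib
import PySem

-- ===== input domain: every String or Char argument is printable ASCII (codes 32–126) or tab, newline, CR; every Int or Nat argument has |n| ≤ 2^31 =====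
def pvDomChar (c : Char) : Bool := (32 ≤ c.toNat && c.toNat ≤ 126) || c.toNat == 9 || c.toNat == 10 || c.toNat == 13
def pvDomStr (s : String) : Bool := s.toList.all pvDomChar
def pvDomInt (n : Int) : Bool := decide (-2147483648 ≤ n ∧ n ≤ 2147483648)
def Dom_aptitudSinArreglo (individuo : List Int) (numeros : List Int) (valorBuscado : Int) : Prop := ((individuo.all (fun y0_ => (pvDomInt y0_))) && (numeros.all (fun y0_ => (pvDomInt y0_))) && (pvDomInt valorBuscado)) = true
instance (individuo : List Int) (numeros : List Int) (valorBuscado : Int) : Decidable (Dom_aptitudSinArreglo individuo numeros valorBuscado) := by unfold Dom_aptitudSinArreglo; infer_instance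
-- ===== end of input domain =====

-- B replaces A's single branch-laden early-return loop by a detect-division-then-fold
-- two-phase computation (objective: simpler). Return-value equivalence only; neither mutates.

-- ===== PORT A =====
-- the for-loop of A: at op 3 the division makes res a float and A returns 2**100
-- (division by zero raises in Python: excluded by Pre_ below)
def aptA_go (pairs : List (Int × Int)) (res : Int) (valorBuscado : Int) : Int :=
  match pairs with
  | [] =>
      if res > valorBuscado then 2 ^ 100
      else if res < 0 then 2 ^ 100
      else valorBuscado - res
  | (operacion, numero) :: rest =>
      let r1 := if operacion = 0 then res + numero else res
      let r2 := if operacion = 1 then r1 - numero else r1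
      let r3 := if operacion = 2 then r2 * numero else r2
      if operacion = 3 then 2 ^ 100
      else aptA_go rest r3 valorBuscado

def aptitudSinArreglo (individuo : List Int) (numeros : List Int) (valorBuscado : Int) : Int :=
  match PySem.List.pyGet? numeros 0 with
  | none => 0  -- numeros[0] raises IndexError: outside Pre_
  | some res => aptA_go (individuo.zip (PySem.List.slice numeros (some 1) none)) res valorBuscado

-- ===== PORT B =====
def aptitudSinArreglo_alt (individuo : List Int) (numeros : List Int) (valorBuscado : Int) : Int :=
  let pairs := individuo.zip (PySem.List.slice numeros (some 1) none)
  if pairs.any (fun p => p.1 == 3) then 2 ^ 100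
  else
    let res := pairs.foldl
      (fun r p =>
        if p.1 = 0 then r + p.2
        else if p.1 = 1 then r - p.2
        else if p.1 = 2 then r * p.2
        else r)
      (match PySem.List.pyGet? numeros 0 with | none => 0 | some x => x)
    if res > valorBuscado ∨ res < 0 then 2 ^ 100 else valorBuscado - res

-- ===== PRECONDITION & SPEC =====
-- Pre_ excludes exactly the inputs where Python A raises: empty numeros (IndexError at
-- numeros[0]) and inputs whose FIRST division pair has divisor 0 (ZeroDivisionError).
def Pre_aptitudSinArreglo (individuo : List Int) (numeros : List Int) (valorBuscado : Int) : Prop :=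
  numeros ≠ [] ∧
  (((individuo.zip (PySem.List.slice numeros (some 1) none)).find? (fun p => p.1 == 3)).all
      (fun p => p.2 != 0)) = true
instance (individuo : List Int) (numeros : List Int) (valorBuscado : Int) : Decidable (Pre_aptitudSinArreglo individuo numeros valorBuscado) := by unfold Pre_aptitudSinArreglo; infer_instance

def pvWitness_aptitudSinArreglo : List Int × List Int × Int := ([0, 2, 3], [4, 1, 2, 3], 10)

def Spec_aptitudSinArreglo (individuo : List Int) (numeros : List Int) (valorBuscado : Int) (out : Int) : Prop := out = aptitudSinArreglo_alt individuo numeros valorBuscado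
instance (individuo : List Int) (numeros : List Int) (valorBuscado : Int) (out : Int) : Decidable (Spec_aptitudSinArreglo individuo numeros valorBuscado out) := by unfold Spec_aptitudSinArreglo; infer_instance

-- ===== CLAIM (what is proved, stated in full; the proofs are below) =====
def Claim_equal_aptitudSinArreglo : Prop := ∀ (individuo : List Int) (numeros : List Int) (valorBuscado : Int), Dom_aptitudSinArreglo individuo numeros valorBuscado → Pre_aptitudSinArreglo individuo numeros valorBuscado → Spec_aptitudSinArreglo individuo numeros valorBuscado (aptitudSinArreglo individuo numeros valorBuscado)

-- ===== LEMMAS AND PROOFS =====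

-- A's loop equals B's detect-then-fold phase on any pair list (and any start value).
theorem aptA_go_eq (pairs : List (Int × Int)) (res valorBuscado : Int) :
    aptA_go pairs res valorBuscado =
      (if pairs.any (fun p => p.1 == 3) then 2 ^ 100
       else
         (fun r => if r > valorBuscado ∨ r < 0 then 2 ^ 100 else valorBuscado - r)
           (pairs.foldl
             (fun r p =>
               if p.1 = 0 then r + p.2
               else if p.1 = 1 then r - p.2
               else if p.1 = 2 then r * p.2
               else r) res)) := by
  induction pairs generalizing res with
  | nil =>
      simp only [aptA_go, List.any_nil, List.foldl_nil, if_neg Bool.false_ne_true]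
      split_ifs <;> simp_all <;> omega
  | cons hd tl ih =>
      obtain ⟨op, n⟩ := hd
      simp only [aptA_go, List.any_cons, List.foldl_cons]
      by_cases h3 : op = 3
      · simp [h3]
      · rw [if_neg h3, ih]
        have : ((op == 3) || tl.any fun p => p.1 == 3) = (tl.any fun p => p.1 == 3) := by
          simp [h3]
        rw [this]
        congr 2
        split_ifs <;> simp_all

-- ===== VERDICT (by name: the statement is the Claim_ definition above) =====
theorem aptitudSinArreglo_spec : Claim_equal_aptitudSinArreglo := by
  intro individuo numeros valorBuscado _ hpre
  unfold Spec_aptitudSinArreglo aptitudSinArreglo aptitudSinArreglo_alt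
  obtain ⟨hne, -⟩ := hpre
  obtain ⟨x, t, rfl⟩ : ∃ x t, numeros = x :: t := by
    cases numeros with
    | nil => exact absurd rfl hne
    | cons x t => exact ⟨x, t, rfl⟩
  simp only [PySem.List.pyGet?_zero_cons]
  exact aptA_go_eq _ _ _
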